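-- pv_equiv track=rewrite | github.com/ntq2k3work/Enrypt_An_toan_thong_tin | Hill.py | convertToMatrix
-- ===== SOURCE A (Python) =====
-- from math import sqrt,floor,ceil
--
-- def convertToMatrix(text,m):
--     matrix_text = []
--     k = 0
--     for i in range(ceil(len(text)/m)) :
--         matrix_text.append([])
--         for j in range(m):
--             if k < len(text) :
--                 matrix_text[i].append(english_alphabet.find(text[k]))
--                 k+=1
--     return matrix_text
--
-- english_alphabet = 'abcdefghijklmnopqrstuvwxyz'
-- ===== SOURCE B (Python) =====
-- from math import ceil
--
-- english_alphabet = 'abcdefghijklmnopqrstuvwxyz'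
--
-- def convertToMatrix(text, m):
--     idx = [english_alphabet.find(c) for c in text]
--     return [idx[i * m:(i + 1) * m] for i in range(ceil(len(text) / m))]
-- ===== Notes on version B (the rewrite author's own statement) =====
-- stated objective: simpler
-- what changed: Replaces A's element-by-element placement (running counter k with a per-element bounds check filling each appended row) by a map phase producing the flat index list followed by slice-based chunking; the bulk slice copies also make B measurably faster by a constant factor.
import Mathlib
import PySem

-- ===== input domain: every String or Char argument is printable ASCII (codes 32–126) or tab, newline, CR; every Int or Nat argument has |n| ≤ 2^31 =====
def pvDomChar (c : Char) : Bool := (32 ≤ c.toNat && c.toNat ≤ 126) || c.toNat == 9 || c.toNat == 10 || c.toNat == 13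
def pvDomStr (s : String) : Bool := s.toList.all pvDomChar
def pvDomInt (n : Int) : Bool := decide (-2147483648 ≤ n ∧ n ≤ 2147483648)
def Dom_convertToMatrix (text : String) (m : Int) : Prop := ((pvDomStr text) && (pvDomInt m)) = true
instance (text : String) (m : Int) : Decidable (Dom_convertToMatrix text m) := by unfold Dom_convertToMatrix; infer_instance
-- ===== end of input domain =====

-- B replaces A's running-counter element placement by a map to the flat index list
-- followed by slice-based chunking (objective: simpler).

-- ===== PORT A =====
-- module-level constant english_alphabet, as a character list (string ops stay on List Char)
def english_alphabet : List Char := "abcdefghijklmnopqrstuvwxyz".toList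

-- 'ceil(len(text)/m)': float division+ceil is exact for these magnitudes on Dom;
-- ported as the integer ceiling -((-n) // m) with Python floor division.
-- 'matrix_text[i].append(x)' mutates row i in place: ported as List.set at i.
def convertToMatrix (text : String) (m : Int) : List (List Int) :=
  let s := text.toList
  let n : Int := (s.length : Int)
  let st :=
    (PySem.List.pyRange 0 (-(PySem.Int.floordiv (-n) m)) 1).foldl
      (fun (st : List (List Int) × Int) i =>
        (PySem.List.pyRange 0 m 1).foldl
          (fun (st2 : List (List Int) × Int) _j =>
            if st2.2 < n then
              (st2.1.set i.toNat ((st2.1.getD i.toNat []) ++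
                 [PySem.Chars.find english_alphabet [PySem.List.pyGetD s st2.2 ' ']]),
               st2.2 + 1)
            else st2)
          (st.1 ++ [[]], st.2))
      ([], 0)
  st.1

-- ===== PORT B =====
def convertToMatrix_alt (text : String) (m : Int) : List (List Int) :=
  let idx : List Int := text.toList.map (fun c => PySem.Chars.find english_alphabet [c])
  let n : Int := ((text.toList.length : Int))
  (PySem.List.pyRange 0 (-(PySem.Int.floordiv (-n) m)) 1).map
    (fun i => PySem.List.slice idx (some (i * m)) (some ((i + 1) * m)))

-- ===== PRECONDITION & SPEC =====
-- m = 0 makes ceil(len(text)/m) raise ZeroDivisionError in both programs.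
def Pre_convertToMatrix (text : String) (m : Int) : Prop := m ≠ 0
instance (text : String) (m : Int) : Decidable (Pre_convertToMatrix text m) := by
  unfold Pre_convertToMatrix; infer_instance
def pvWitness_convertToMatrix : String × Int := ("hello world", 4)

def Spec_convertToMatrix (text : String) (m : Int) (out : List (List Int)) : Prop := out = convertToMatrix_alt text m
instance (text : String) (m : Int) (out : List (List Int)) : Decidable (Spec_convertToMatrix text m out) := by unfold Spec_convertToMatrix; infer_instance

-- ===== CLAIM (what is proved, stated in full; the proofs are below) =====
def Claim_equal_convertToMatrix : Prop := ∀ (text : String) (m : Int), Dom_convertToMatrix text m → Pre_convertToMatrix text m → Spec_convertToMatrix text m (convertToMatrix text m)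

-- ===== LEMMAS AND PROOFS =====

def pvF (s : List Char) (k : Int) : Int :=
  PySem.Chars.find english_alphabet [PySem.List.pyGetD s k ' ']

def pvG (s : List Char) (i : Nat) (st2 : List (List Int) × Int) : List (List Int) × Int :=
  if st2.2 < (s.length : Int) then
    (st2.1.set i ((st2.1.getD i []) ++ [pvF s st2.2]), st2.2 + 1)
  else st2

lemma pv_inner (s : List Char) (i : Nat) (c : Nat) :
    ∀ (P : List (List Int)) (row : List Int) (k : Int), P.length = i → 0 ≤ k → k ≤ (s.length : Int) →
    (pvG s i)^[c] (P ++ [row], k)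
      = (P ++ [row ++ (PySem.List.pyRange k (min (k + (c : Int)) (s.length : Int)) 1).map (pvF s)],
         min (k + (c : Int)) (s.length : Int)) := by
  induction c with
  | zero =>
    intro P row k hP hk hkn
    simp
    omega
  | succ c ih =>
    intro P row k hP hk hkn
    rw [Function.iterate_succ_apply]
    by_cases h : k < (s.length : Int)
    · have hget : (P ++ [row])[i]?.getD [] = row := by
        subst hP; simp
      have hset : ∀ x : List Int, (P ++ [row]).set i x = P ++ [x] := by
        intro x; subst hP
        rw [List.set_append_right _ _ (le_refl _)]
        simp
      rw [show pvG s i (P ++ [row], k)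
            = (P ++ [row ++ [pvF s k]], k + 1) by
        simp [pvG, h, hget, hset]]
      rw [ih P (row ++ [pvF s k]) (k+1) hP (by omega) (by omega)]
      simp only [Nat.cast_add, Nat.cast_one]
      rw [show k + ((c:Int)+1) = k+1+(c:Int) by ring]
      rw [PySem.List.pyRange_one_cons (show k < min (k+1+(c:Int)) (s.length:Int) by omega)]
      simp
    · have : pvG s i (P ++ [row], k) = (P ++ [row], k) := by simp [pvG, h]
      rw [this, ih P row k hP hk hkn]
      have : min (k + (c:Int)) (s.length:Int) = min (k + ((c:Int)+1)) (s.length:Int) := by omega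
      simp only [Nat.cast_add, Nat.cast_one]
      rw [this]

def pvIdx (s : List Char) : List Int := s.map (fun c => PySem.Chars.find english_alphabet [c])

lemma pv_chunk (s : List Char) (a mI : Int) (ha : 0 ≤ a) (han : a ≤ (s.length : Int)) (hm : 0 < mI) :
    (PySem.List.pyRange a (min (a + mI) (s.length : Int)) 1).map (pvF s)
      = PySem.List.slice (pvIdx s) (some a) (some (a + mI)) := by
  rw [PySem.List.slice_toNat _ ha (by omega)]
  apply List.ext_getElem
  · simp [PySem.List.length_pyRange_one, pvIdx]
    omega
  · intro p hp1 hp2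
    have hp1' : p < (min (a + mI) (s.length : Int) - a).toNat := by
      simpa [PySem.List.length_pyRange_one] using hp1
    have hlt : a + (p : Int) < (s.length : Int) := by omega
    simp only [List.getElem_map, PySem.List.getElem_pyRange_one, List.getElem_take,
      List.getElem_drop, pvIdx]
    have hidx : (a + (p:Int)).toNat = a.toNat + p := by omega
    rw [pvF, PySem.List.pyGetD_eq_getElem _ _ (by omega) hlt]
    exact congrArg (fun x => PySem.Chars.find english_alphabet [x]) (getElem_congr rfl hidx (by omega))

lemma pv_outer (s : List Char) (m : Int) (hm : 0 < m) (r : Int)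
    (hr : (r - 1) * m < (s.length : Int)) :
    ∀ j : Nat, (j : Int) ≤ r →
    (PySem.List.pyRange 0 (j : Int) 1).foldl
      (fun (st : List (List Int) × Int) i =>
        (PySem.List.pyRange 0 m 1).foldl
          (fun (st2 : List (List Int) × Int) _j =>
            if st2.2 < (s.length : Int) then
              (st2.1.set i.toNat ((st2.1.getD i.toNat []) ++
                 [PySem.Chars.find english_alphabet [PySem.List.pyGetD s st2.2 ' ']]),
               st2.2 + 1)
            else st2)
          (st.1 ++ [[]], st.2))
      ([], 0)
    = ((PySem.List.pyRange 0 (j : Int) 1).map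
         (fun i => PySem.List.slice (pvIdx s) (some (i * m)) (some ((i + 1) * m))),
       min ((j : Int) * m) (s.length : Int)) := by
  intro j
  induction j with
  | zero => intro _; simp [PySem.List.pyRange_one_eq_nil (le_refl (0:Int))]
  | succ j ih =>
    intro hj
    have hjr : (j : Int) < r := by push_cast at hj ⊢; omega
    have hjm : (j : Int) * m < (s.length : Int) := by
      calc (j:Int) * m ≤ (r-1) * m := by
            apply mul_le_mul_of_nonneg_right (by omega) (by omega)
        _ < (s.length : Int) := hr
    have hjm0 : 0 ≤ (j : Int) * m := by positivity
    simp only [Nat.cast_add, Nat.cast_one]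
    rw [PySem.List.pyRange_one_succ_right (by positivity : (0:Int) ≤ (j:Int)),
        List.foldl_append, List.map_append]
    rw [ih (le_of_lt hjr)]
    simp only [List.foldl_cons, List.foldl_nil]
    -- the inner loop ignores its variable: turn it into an iterate of pvG
    rw [show (fun (st2 : List (List Int) × Int) (_j : Int) =>
            if st2.2 < (s.length : Int) then
              (st2.1.set ((j:Int)).toNat ((st2.1.getD ((j:Int)).toNat []) ++
                 [PySem.Chars.find english_alphabet [PySem.List.pyGetD s st2.2 ' ']]),
               st2.2 + 1)
            else st2)
        = (fun st2 _ => pvG s ((j:Int)).toNat st2) by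
      funext st2 _j; simp [pvG, pvF]]
    rw [List.foldl_const]
    have hlen : ((PySem.List.pyRange 0 (j:Int) 1).map
        (fun i => PySem.List.slice (pvIdx s) (some (i * m)) (some ((i + 1) * m)))).length = j := by
      simp [PySem.List.length_pyRange_one]
    have htn : ((j:Int)).toNat = j := by omega
    have hmin : min ((j:Int) * m) (s.length : Int) = (j:Int) * m := by omega
    rw [hmin, PySem.List.length_pyRange_one, htn]
    rw [pv_inner s j (m - 0).toNat _ [] _ hlen (by omega) (by omega)]
    have hc : ((m - 0).toNat : Int) = m := by omega
    rw [hc]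
    simp only [Prod.mk.injEq]
    constructor
    · rw [pv_chunk s ((j:Int)*m) m hjm0 (by omega) hm]
      have he : (j:Int) * m + m = ((j:Int) + 1) * m := by ring
      simp [he]
    · have he : (j:Int) * m + m = ((j:Int) + 1) * m := by ring
      rw [he]

-- ===== VERDICT (by name: the statement is the Claim_ definition above) =====
theorem convertToMatrix_spec : Claim_equal_convertToMatrix := by
  intro text m _ hm0
  unfold Pre_convertToMatrix at hm0
  unfold Spec_convertToMatrix
  simp only [convertToMatrix, convertToMatrix_alt]
  rcases lt_or_gt_of_ne hm0 with hneg | hpos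
  · -- m < 0: the row count -((-n)//m) is ≤ 0, both ranges are empty
    have hq : 0 ≤ PySem.Int.floordiv (-((text.toList.length : Int))) m := by
      have h1 := PySem.Int.floordiv_mul_add_mod (-((text.toList.length : Int))) m
      have h2 := PySem.Int.mod_neg_bounds (-((text.toList.length : Int))) hneg
      nlinarith [h2.1, h2.2, Int.natCast_nonneg text.toList.length]
    rw [show PySem.List.pyRange 0 (-(PySem.Int.floordiv (-((text.toList.length : Int))) m)) 1 = ([] : List Int) from PySem.List.pyRange_one_eq_nil (by omega)]
    simp
  · -- m > 0: the main loop invariant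
    set s := text.toList with hs
    set n : Int := (s.length : Int) with hn
    set r : Int := -(PySem.Int.floordiv (-n) m) with hrdef
    have hr := (PySem.Int.neg_floordiv_neg_eq_iff_of_pos hpos).mp hrdef.symm
    have hr0 : 0 ≤ r := by nlinarith [hr.2, Int.natCast_nonneg s.length]
    have hrn : ((r.toNat : Int)) = r := Int.toNat_of_nonneg hr0
    have h := pv_outer s m hpos r hr.1 r.toNat (by omega)
    rw [hrn] at h
    rw [h]
    simp [pvIdx]
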